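-- pv_equiv track=rewrite | github.com/ZeR0HeR00/CA_Formation | Eau/eau14.py | compare_ascii
-- ===== SOURCE A (Python) =====
-- def compare_ascii(first_word, second_word):
--     min_length = min(len(first_word), len(second_word))
--
--     for i in range(min_length):
--         if ord(first_word[i]) < ord(second_word[i]):
--             return -1
--         elif ord(first_word[i]) > ord(second_word[i]):
--             return 1
--     if len(first_word) < len(second_word):
--         return -1
--     elif len(first_word) > len(second_word):
--         return 1
--     else:
--         return 0
-- ===== SOURCE B (Python) =====
-- def compare_ascii(first_word, second_word):
--     return (first_word > second_word) - (first_word < second_word)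
-- ===== Notes on version B (the rewrite author's own statement) =====
-- stated objective: idiomatic
-- what changed: Replaced the explicit index loop with per-character ord comparisons and length tie-break by the closed-form three-way expression (a > b) - (a < b) using Python's built-in lexicographic string ordering (comparison runs in C, not per-character Python bytecode).
import Mathlib
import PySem

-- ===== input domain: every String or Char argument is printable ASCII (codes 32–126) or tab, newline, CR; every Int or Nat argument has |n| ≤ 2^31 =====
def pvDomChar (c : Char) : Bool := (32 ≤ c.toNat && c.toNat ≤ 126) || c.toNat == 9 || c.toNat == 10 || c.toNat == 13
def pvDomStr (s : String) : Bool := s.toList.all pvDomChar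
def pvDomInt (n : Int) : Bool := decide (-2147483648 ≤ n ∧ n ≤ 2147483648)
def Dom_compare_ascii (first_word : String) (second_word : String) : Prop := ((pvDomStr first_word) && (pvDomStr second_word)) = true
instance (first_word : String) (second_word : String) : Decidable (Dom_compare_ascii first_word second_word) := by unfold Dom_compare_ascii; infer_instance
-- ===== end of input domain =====

-- B replaces A's indexed ord-comparison loop and length tie-break by the closed-form
-- three-way expression (a > b) - (a < b) over Python's built-in string ordering (idiomatic).

-- ===== PORT A =====
-- the 'for i in range(min_length)' scan: walks both character lists in parallel over the
-- shared prefix; 'some r' is an early return, 'none' means the loop fell through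
def compareAsciiLoop : List Char → List Char → Option Int
  | a :: as, b :: bs =>
      if a.toNat < b.toNat then some (-1)              -- ord(first[i]) < ord(second[i])
      else if b.toNat < a.toNat then some 1            -- ord(first[i]) > ord(second[i])
      else compareAsciiLoop as bs
  | _, _ => none

def compare_ascii (first_word : String) (second_word : String) : Int :=
  match compareAsciiLoop first_word.toList second_word.toList with
  | some r => r
  | none =>
      if first_word.toList.length < second_word.toList.length then -1
      else if second_word.toList.length < first_word.toList.length then 1
      else 0

-- ===== PORT B =====
-- (first_word > second_word) - (first_word < second_word); Lean's String `<` is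
-- lexicographic by code point on toList, exactly Python's string ordering
def compare_ascii_alt (first_word : String) (second_word : String) : Int :=
  (if second_word < first_word then (1 : Int) else 0)
    - (if first_word < second_word then (1 : Int) else 0)

-- ===== PRECONDITION & SPEC =====
def Spec_compare_ascii (first_word : String) (second_word : String) (out : Int) : Prop := out = compare_ascii_alt first_word second_word
instance (first_word : String) (second_word : String) (out : Int) : Decidable (Spec_compare_ascii first_word second_word out) := by unfold Spec_compare_ascii; infer_instance

-- ===== CLAIM (what is proved, stated in full; the proofs are below) =====
def Claim_equal_compare_ascii : Prop := ∀ (first_word : String) (second_word : String), Dom_compare_ascii first_word second_word → Spec_compare_ascii first_word second_word (compare_ascii first_word second_word)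

-- ===== LEMMAS AND PROOFS =====

theorem compareAscii_list (as bs : List Char) :
    (match compareAsciiLoop as bs with
     | some r => r
     | none =>
         if as.length < bs.length then (-1 : Int)
         else if bs.length < as.length then 1
         else 0)
    = (if bs < as then (1 : Int) else 0) - (if as < bs then (1 : Int) else 0) := by
  induction as generalizing bs with
  | nil =>
      cases bs with
      | nil => simp [compareAsciiLoop]
      | cons b bs => simp [compareAsciiLoop, List.nil_lt_cons, List.not_lt_nil]
  | cons a as ih =>
      cases bs with
      | nil => simp [compareAsciiLoop, List.nil_lt_cons, List.not_lt_nil]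
      | cons b bs =>
          by_cases h1 : a.toNat < b.toNat
          · have hab : a < b := h1
            have hnba : ¬ b < a := fun h => absurd (show b.toNat < a.toNat from h) (by omega)
            have hne : b ≠ a := by intro h; subst h; omega
            simp [compareAsciiLoop, h1, List.cons_lt_cons_iff, hab, hnba, hne]
          · by_cases h2 : b.toNat < a.toNat
            · have hba : b < a := h2
              have hnab : ¬ a < b := h1
              have hne : a ≠ b := by intro h; subst h; omega
              simp [compareAsciiLoop, h1, h2, List.cons_lt_cons_iff, hba, hnab, hne]
            · have heq : a = b := by
                apply Char.ext; apply UInt32.toNat_inj.mp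
                show a.toNat = b.toNat; omega
              subst heq
              have := ih bs
              simpa [compareAsciiLoop, h1, List.cons_lt_cons_iff,
                Nat.succ_lt_succ_iff, lt_irrefl] using this

-- ===== VERDICT (by name: the statement is the Claim_ definition above) =====
theorem compare_ascii_spec : Claim_equal_compare_ascii := by
  intro fw sw _
  unfold Spec_compare_ascii compare_ascii compare_ascii_alt
  simpa [String.lt_iff] using compareAscii_list fw.toList sw.toList
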